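-- pv_equiv track=rewrite | github.com/GozerAI/arclane | src/arclane/performance/cdn_headers.py | get_cache_duration
-- ===== SOURCE A (Python) =====
-- STATIC_CACHE_RULES = {
--     ".js": 86400 * 30,    # 30 days
--     ".css": 86400 * 30,   # 30 days
--     ".png": 86400 * 365,  # 1 year
--     ".jpg": 86400 * 365,
--     ".jpeg": 86400 * 365,
--     ".gif": 86400 * 365,
--     ".svg": 86400 * 365,
--     ".ico": 86400 * 365,
--     ".woff2": 86400 * 365,
--     ".woff": 86400 * 365,
--     ".ttf": 86400 * 365,
--     ".webp": 86400 * 365,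
-- }
--
-- API_CACHE_RULES = {
--     "/health": 10,
--     "/api/live": 5,
--     "/api/live/stats": 30,
--     "/robots.txt": 86400,
-- }
--
-- def get_cache_duration(path: str) -> int | None:
--     """Determine cache duration for a given request path."""
--     # Check static rules by extension
--     for ext, duration in STATIC_CACHE_RULES.items():
--         if path.endswith(ext):
--             return duration
--
--     # Check API rules
--     for prefix, duration in API_CACHE_RULES.items():
--         if path == prefix or path.startswith(prefix + "/"):
--             return duration
--
--     return None
-- ===== SOURCE B (Python) =====
-- STATIC_CACHE_RULES = {
--     ".js": 86400 * 30,
--     ".css": 86400 * 30,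
--     ".png": 86400 * 365,
--     ".jpg": 86400 * 365,
--     ".jpeg": 86400 * 365,
--     ".gif": 86400 * 365,
--     ".svg": 86400 * 365,
--     ".ico": 86400 * 365,
--     ".woff2": 86400 * 365,
--     ".ttf": 86400 * 365,
--     ".woff": 86400 * 365,
--     ".webp": 86400 * 365,
-- }
--
-- API_CACHE_RULES = {
--     "/health": 10,
--     "/api/live": 5,
--     "/api/live/stats": 30,
--     "/robots.txt": 86400,
-- }
--
-- def get_cache_duration(path: str) -> int | None:
--     """Determine cache duration for a request path by scanning the path itself:
--     one backwards pass finds the extension (last '.'), another finds the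
--     longest rule prefix ending at a '/' boundary."""
--     # Extension rule: only the suffix starting at the LAST '.' can be a key.
--     j = len(path)
--     while j > 0:
--         j -= 1
--         if path[j] == '.':
--             d = STATIC_CACHE_RULES.get(path[j:])
--             if d is not None:
--                 return d
--             break
--     # API rule: longest matching prefix (whole path, or cut at a '/').
--     if path in API_CACHE_RULES:
--         return API_CACHE_RULES[path]
--     j = len(path)
--     while j > 0:
--         j -= 1
--         if path[j] == '/':
--             d = API_CACHE_RULES.get(path[:j])
--             if d is not None:
--                 return d
--     return None
-- ===== Notes on version B (the rewrite author's own statement) =====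
-- stated objective: alternative
-- what changed: Instead of scanning the rule tables and testing each key against the path (endswith / startswith), B scans the path itself backwards: one pass finds the last '.' and does a single dict lookup of that suffix, another pass tries dict lookups of the path cut at each '/' from longest to shortest (longest-prefix match).
-- intended difference: On paths equal to '/api/live/stats' or below it (and not ending in a static extension) A returns 5 because the shorter '/api/live' rule shadows the explicit '/api/live/stats': 30 rule, which is dead code in A; B's longest-prefix match returns the intended 30. — e.g. on get_cache_duration("/api/live/stats"): A returns some 5, B returns some 30
import Mathlib
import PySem

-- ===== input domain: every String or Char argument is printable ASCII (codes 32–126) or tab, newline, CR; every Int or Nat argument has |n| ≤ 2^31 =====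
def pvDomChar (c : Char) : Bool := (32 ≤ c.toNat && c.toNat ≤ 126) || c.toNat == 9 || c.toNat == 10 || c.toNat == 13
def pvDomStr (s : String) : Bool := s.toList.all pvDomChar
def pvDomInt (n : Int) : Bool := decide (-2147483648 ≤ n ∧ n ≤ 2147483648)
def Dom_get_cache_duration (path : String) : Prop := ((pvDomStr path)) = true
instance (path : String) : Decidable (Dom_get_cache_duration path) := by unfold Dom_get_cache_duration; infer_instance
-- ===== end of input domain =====

-- B re-implements the lookup by scanning the path itself (last-'.' suffix lookup, then longest '/'-cut prefix
-- lookup) instead of scanning the rule tables; B intentionally returns the table's 30 for paths at/below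
-- '/api/live/stats' where A's first-match prefix scan returns 5 (see D_ below).

-- ===== PORT A =====
def STATIC_CACHE_RULES : PySem.Dict String Int :=
  ⟨[(".js", 2592000), (".css", 2592000), (".png", 31536000), (".jpg", 31536000), (".jpeg", 31536000), (".gif", 31536000), (".svg", 31536000), (".ico", 31536000), (".woff2", 31536000), (".woff", 31536000), (".ttf", 31536000), (".webp", 31536000)]⟩

def API_CACHE_RULES : PySem.Dict String Int :=
  ⟨[("/health", 10), ("/api/live", 5), ("/api/live/stats", 30), ("/robots.txt", 86400)]⟩

-- 'for ext, duration in STATIC_CACHE_RULES.items(): if path.endswith(ext): return duration'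
def staticLoop (rules : List (String × Int)) (path : String) : Option Int :=
  match rules with
  | [] => none
  | (ext, duration) :: rest =>
    if PySem.Str.endswith path ext then some duration else staticLoop rest path

-- 'for prefix, duration in API_CACHE_RULES.items(): if path == prefix or path.startswith(prefix + "/"): return duration'
def apiLoop (rules : List (String × Int)) (path : String) : Option Int :=
  match rules with
  | [] => none
  | (pre, duration) :: rest =>
    if path == pre || PySem.Str.startswith path (pre ++ "/") then some duration else apiLoop rest path

def get_cache_duration (path : String) : Option Int :=
  match staticLoop STATIC_CACHE_RULES.items path with
  | some duration => some duration
  | none => apiLoop API_CACHE_RULES.items path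

-- ===== PORT B =====
-- Source B's first backwards while-loop: j counts down; path[j] is l[j]? (j is always in range here);
-- path[j:] with 0 ≤ j is l.drop j (= PySem.List.slice l (some j) none, exact by PySem.List.slice_from_natCast).
-- On the first '.' found (from the end) the loop either returns the dict lookup or breaks;
-- both outcomes are exactly that lookup's result, so the branch returns it directly.
def extScan (l : List Char) : Nat → Option Int
  | 0 => none
  | j + 1 =>
    if l[j]? = some '.' then PySem.Dict.get? STATIC_CACHE_RULES (String.ofList (l.drop j))
    else extScan l j

-- Source B's second backwards while-loop: path[:j] with 0 ≤ j is l.take j (PySem.List.slice_to_natCast); no break: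
-- a failed lookup keeps scanning shorter prefixes.
def apiScan (l : List Char) : Nat → Option Int
  | 0 => none
  | j + 1 =>
    if l[j]? = some '/' then
      match PySem.Dict.get? API_CACHE_RULES (String.ofList (l.take j)) with
      | some d => some d
      | none => apiScan l j
    else apiScan l j

def get_cache_duration_alt (path : String) : Option Int :=
  match extScan path.toList path.toList.length with
  | some d => some d
  | none =>
    -- 'if path in API_CACHE_RULES: return API_CACHE_RULES[path]'
    match PySem.Dict.get? API_CACHE_RULES path with
    | some d => some d
    | none => apiScan path.toList path.toList.length

-- ===== PRECONDITION & SPEC =====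
-- On paths equal to "/api/live/stats" or strictly below it (and not ending in a static extension) A returns 5,
-- because the shorter "/api/live" rule shadows the explicit "/api/live/stats": 30 rule — dead code in A;
-- B's longest-prefix match returns the intended 30.
def D_get_cache_duration (path : String) : Prop :=
  (path = "/api/live/stats" ∨ PySem.Str.startswith path "/api/live/stats/" = true) ∧
  (∀ e ∈ ([".js", ".css", ".png", ".jpg", ".jpeg", ".gif", ".svg", ".ico", ".woff2", ".woff", ".ttf", ".webp"] : List String), PySem.Str.endswith path e = false)
instance (path : String) : Decidable (D_get_cache_duration path) := by unfold D_get_cache_duration; infer_instance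

def Spec_get_cache_duration (path : String) (out : Option Int) : Prop :=
  ¬ D_get_cache_duration path → out = get_cache_duration_alt path
instance (path : String) (out : Option Int) : Decidable (Spec_get_cache_duration path out) := by unfold Spec_get_cache_duration; infer_instance

def pvDiffWitness_get_cache_duration : String := "/api/live/stats"
def pvDiffWitnessOut_get_cache_duration : (Option Int) × (Option Int) := (some 5, some 30)

-- ===== CLAIM (what is proved, stated in full; the proofs are below) =====
def Claim_unchanged_get_cache_duration : Prop := ∀ (path : String), Dom_get_cache_duration path → Spec_get_cache_duration path (get_cache_duration path)
def Claim_changed_get_cache_duration : Prop := Dom_get_cache_duration (pvDiffWitness_get_cache_duration) ∧ D_get_cache_duration (pvDiffWitness_get_cache_duration) ∧ get_cache_duration (pvDiffWitness_get_cache_duration) = pvDiffWitnessOut_get_cache_duration.1 ∧ get_cache_duration_alt (pvDiffWitness_get_cache_duration) = pvDiffWitnessOut_get_cache_duration.2 ∧ pvDiffWitnessOut_get_cache_duration.1 ≠ pvDiffWitnessOut_get_cache_duration.2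
def Claim_exact_get_cache_duration : Prop := ∀ (path : String), Dom_get_cache_duration path → D_get_cache_duration path → get_cache_duration path ≠ get_cache_duration_alt path

-- ===== LEMMAS AND PROOFS =====

-- closed-form evaluation of the two dictionary lookups at an arbitrary key
theorem pv_static_get (s : String) : PySem.Dict.get? STATIC_CACHE_RULES s =
    if ".js" = s then some 2592000 else if ".css" = s then some 2592000 else if ".png" = s then some 31536000 else if ".jpg" = s then some 31536000 else if ".jpeg" = s then some 31536000 else if ".gif" = s then some 31536000 else if ".svg" = s then some 31536000 else if ".ico" = s then some 31536000 else if ".woff2" = s then some 31536000 else if ".woff" = s then some 31536000 else if ".ttf" = s then some 31536000 else if ".webp" = s then some 31536000 else none := by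
  simp only [STATIC_CACHE_RULES, PySem.Dict.get?_mk_cons, beq_iff_eq]; rfl

theorem pv_api_get (s : String) : PySem.Dict.get? API_CACHE_RULES s =
    if "/health" = s then some 10 else if "/api/live" = s then some 5 else
    if "/api/live/stats" = s then some 30 else if "/robots.txt" = s then some 86400 else none := by
  simp only [API_CACHE_RULES, PySem.Dict.get?_mk_cons, beq_iff_eq]; rfl

def pvStaticKeys : List String := [".js", ".css", ".png", ".jpg", ".jpeg", ".gif", ".svg", ".ico", ".woff2", ".woff", ".ttf", ".webp"]
def pvApiKeys : List String := ["/health", "/api/live", "/api/live/stats", "/robots.txt"]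

-- the condition under which Source B's prefix loop fires for a given rule key
def pvQ (l : List Char) (k : String) : Prop :=
  l.take k.toList.length = k.toList ∧ l[k.toList.length]? = some '/'

-- the two loops of each port, unfolded on the literal rule tables
theorem pv_staticLoop_eval (path : String) : staticLoop STATIC_CACHE_RULES.items path =
    if PySem.Chars.endswith path.toList ('.' :: ('j'::'s'::[])) = true then some 2592000 else if PySem.Chars.endswith path.toList ('.' :: ('c'::'s'::'s'::[])) = true then some 2592000 else if PySem.Chars.endswith path.toList ('.' :: ('p'::'n'::'g'::[])) = true then some 31536000 else if PySem.Chars.endswith path.toList ('.' :: ('j'::'p'::'g'::[])) = true then some 31536000 else if PySem.Chars.endswith path.toList ('.' :: ('j'::'p'::'e'::'g'::[])) = true then some 31536000 else if PySem.Chars.endswith path.toList ('.' :: ('g'::'i'::'f'::[])) = true then some 31536000 else if PySem.Chars.endswith path.toList ('.' :: ('s'::'v'::'g'::[])) = true then some 31536000 else if PySem.Chars.endswith path.toList ('.' :: ('i'::'c'::'o'::[])) = true then some 31536000 else if PySem.Chars.endswith path.toList ('.' :: ('w'::'o'::'f'::'f'::'2'::[])) = true then some 31536000 else if PySem.Chars.endswith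 path.toList ('.' :: ('w'::'o'::'f'::'f'::[])) = true then some 31536000 else if PySem.Chars.endswith path.toList ('.' :: ('t'::'t'::'f'::[])) = true then some 31536000 else if PySem.Chars.endswith path.toList ('.' :: ('w'::'e'::'b'::'p'::[])) = true then some 31536000 else none := rfl

theorem pv_apiLoop_eval (path : String) : apiLoop API_CACHE_RULES.items path =
    if (path == "/health" || PySem.Str.startswith path ("/health" ++ "/")) then some 10
    else if (path == "/api/live" || PySem.Str.startswith path ("/api/live" ++ "/")) then some 5
    else if (path == "/api/live/stats" || PySem.Str.startswith path ("/api/live/stats" ++ "/")) then some 30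
    else if (path == "/robots.txt" || PySem.Str.startswith path ("/robots.txt" ++ "/")) then some 86400
    else none := rfl

theorem pv_suffix_of_eq_ofList {e : String} {l : List Char} {j : Nat}
    (h : e = String.ofList (l.drop j)) : e.toList <:+ l := by
  rw [h, String.toList_ofList]; exact List.drop_suffix j l

set_option maxHeartbeats 1000000 in
theorem pv_static_get_drop_none (l : List Char) (j : Nat)
    (hs : ∀ e ∈ pvStaticKeys, ¬ (e.toList <:+ l)) :
    PySem.Dict.get? STATIC_CACHE_RULES (String.ofList (l.drop j)) = none := by
  rw [pv_static_get]
  split_ifs <;> first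
    | rfl
    | exact absurd (pv_suffix_of_eq_ofList ‹_›) (hs _ (by simp [pvStaticKeys]))

theorem pv_take_hit {k : String} {l : List Char} {j : Nat}
    (h : k = String.ofList (l.take j)) (hj : l[j]? = some '/') :
    pvQ l k ∧ k.toList.length = j := by
  have hjlen : j < l.length := (List.getElem?_eq_some_iff.mp hj).1
  have htl : k.toList = l.take j := by rw [h, String.toList_ofList]
  have hlen : k.toList.length = j := by rw [htl, List.length_take]; omega
  exact ⟨⟨by rw [hlen, htl], by rw [hlen]; exact hj⟩, hlen⟩

set_option maxHeartbeats 1000000 in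
theorem pv_api_get_take_none (l : List Char) (j : Nat) (hj : l[j]? = some '/')
    (hq : ∀ k ∈ pvApiKeys, k.toList.length = j → ¬ pvQ l k) :
    PySem.Dict.get? API_CACHE_RULES (String.ofList (l.take j)) = none := by
  rw [pv_api_get]
  split_ifs <;> first
    | rfl
    | exact absurd (pv_take_hit ‹_› hj).1 (hq _ (by simp [pvApiKeys]) (pv_take_hit ‹_› hj).2)

theorem pv_extScan_miss (l : List Char) (hs : ∀ e ∈ pvStaticKeys, ¬ (e.toList <:+ l)) :
    ∀ m, extScan l m = none := by
  intro m
  induction m with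
  | zero => rfl
  | succ j ih =>
    simp only [extScan]
    by_cases hc : l[j]? = some '.'
    · rw [if_pos hc]; exact pv_static_get_drop_none l j hs
    · rw [if_neg hc]; exact ih

theorem pv_extScan_hit (pre t : List Char) (hnd : '.' ∉ t) (m : Nat)
    (h1 : pre.length < m) (h2 : m ≤ (pre ++ '.' :: t).length) :
    extScan (pre ++ '.' :: t) m = PySem.Dict.get? STATIC_CACHE_RULES (String.ofList ('.' :: t)) := by
  induction m with
  | zero => omega
  | succ j ih =>
    simp only [extScan]
    by_cases hj : j = pre.length
    · subst hj
      rw [if_pos (by rw [List.getElem?_append_right (le_refl _)]; simp)]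
      rw [List.drop_left]
    · have hne : (pre ++ '.' :: t)[j]? ≠ some '.' := by
        rw [List.getElem?_append_right (by omega)]
        have hsh : j - pre.length = (j - pre.length - 1) + 1 := by omega
        rw [hsh]
        simp only [List.getElem?_cons_succ]
        intro hcc
        exact hnd (List.mem_of_getElem? hcc)
      rw [if_neg hne]
      exact ih (by omega) (by simp only [List.length_append, List.length_cons] at h2 ⊢; omega)

theorem pv_apiScan_miss (l : List Char) (hq : ∀ k ∈ pvApiKeys, ¬ pvQ l k) :
    ∀ m, apiScan l m = none := by
  intro m
  induction m with
  | zero => rfl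
  | succ j ih =>
    simp only [apiScan]
    by_cases hj : l[j]? = some '/'
    · rw [if_pos hj, pv_api_get_take_none l j hj (fun k hk _ => hq k hk)]
      exact ih
    · rw [if_neg hj]; exact ih

theorem pv_apiScan_hit (l : List Char) (k : String) (v : Int)
    (hv : PySem.Dict.get? API_CACHE_RULES k = some v) (hQ : pvQ l k)
    (hlong : ∀ k' ∈ pvApiKeys, k.toList.length < k'.toList.length → ¬ pvQ l k')
    (m : Nat) (h1 : k.toList.length < m) (h2 : m ≤ l.length) :
    apiScan l m = some v := by
  induction m with
  | zero => omega
  | succ j ih =>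
    simp only [apiScan]
    by_cases hj : j = k.toList.length
    · subst hj
      rw [if_pos hQ.2, show l.take k.toList.length = k.toList from hQ.1, String.ofList_toList, hv]
    · have hgt : k.toList.length < j := by omega
      by_cases hj2 : l[j]? = some '/'
      · rw [if_pos hj2, pv_api_get_take_none l j hj2
          (fun k' hk' hlen hq' => hlong k' hk' (by omega) hq')]
        exact ih (by omega) (by omega)
      · rw [if_neg hj2]
        exact ih (by omega) (by omega)

theorem pv_startswith_slash_iff (path k : String) :
    PySem.Str.startswith path (k ++ "/") = true ↔ pvQ path.toList k := by
  rw [PySem.Str.startswith_eq, PySem.Chars.startswith_iff]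
  have htl : (k ++ "/").toList = k.toList ++ ['/'] := by simp
  rw [htl]
  constructor
  · rintro ⟨rest, hrest⟩
    have hl : path.toList = k.toList ++ '/' :: rest := by
      rw [← hrest]; simp
    constructor
    · rw [hl, List.take_left]
    · rw [hl, List.getElem?_append_right (le_refl _)]; simp
  · rintro ⟨h1, h2⟩
    rw [List.prefix_iff_eq_take]
    have hlen1 : (k.toList ++ ['/']).length = k.toList.length + 1 := by simp
    rw [hlen1, List.take_add_one, h1, h2]
    rfl

theorem pv_not_suffix {l e : List Char} (h : ¬ PySem.Chars.endswith l e = true) :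
    ¬ (e <:+ l) :=
  fun hs => h ((PySem.Chars.endswith_iff _ _).mpr hs)

theorem pv_take_clash {l a b : List Char} (ha : l.take a.length = a)
    (hb : l.take b.length = b) (hab : a.length ≤ b.length)
    (hne : b.take a.length ≠ a) : False := by
  have h2 : b.take a.length = l.take a.length := by
    rw [← hb, List.take_take, min_eq_left hab]
  exact hne (h2.trans ha)

theorem pv_cond_false (path k : String) (hne : path ≠ k) (hnq : ¬ pvQ path.toList k) :
    (path == k || PySem.Str.startswith path (k ++ "/")) = false := by
  apply Bool.or_eq_false_iff.mpr
  refine ⟨beq_eq_false_iff_ne.mpr hne, ?_⟩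
  exact Bool.eq_false_iff.mpr (fun h => hnq ((pv_startswith_slash_iff path k).mp h))

theorem pv_cond_true_of_Q (path k : String) (hq : pvQ path.toList k) :
    (path == k || PySem.Str.startswith path (k ++ "/")) = true := by
  have h2 : PySem.Chars.startswith path.toList (k.toList ++ ['/']) = true := by
    have h := (pv_startswith_slash_iff path k).mpr hq
    rw [PySem.Str.startswith_eq] at h
    rw [show (k ++ "/").toList = k.toList ++ ['/'] from by simp] at h
    exact h
  simp [h2]

theorem pv_static_eq (path : String) :
    staticLoop STATIC_CACHE_RULES.items path = extScan path.toList path.toList.length := by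
  by_cases h1 : PySem.Chars.endswith path.toList ('.' :: ('j'::'s'::[])) = true
  · obtain ⟨pre, hpre⟩ := (PySem.Chars.endswith_iff _ _).mp h1
    have hl : path.toList = pre ++ '.' :: ('j'::'s'::[]) := hpre.symm
    have hLHS : staticLoop STATIC_CACHE_RULES.items path = some 2592000 := by
      rw [pv_staticLoop_eval]; simp [h1]
    rw [hLHS, hl, pv_extScan_hit pre ('j'::'s'::[]) (by decide) ((pre ++ '.' :: ('j'::'s'::[])).length)
      (by simp only [List.length_append, List.length_cons]; omega) (le_refl _)]
    decide
  by_cases h2 : PySem.Chars.endswith path.toList ('.' :: ('c'::'s'::'s'::[])) = true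
  · obtain ⟨pre, hpre⟩ := (PySem.Chars.endswith_iff _ _).mp h2
    have hl : path.toList = pre ++ '.' :: ('c'::'s'::'s'::[]) := hpre.symm
    have hLHS : staticLoop STATIC_CACHE_RULES.items path = some 2592000 := by
      rw [pv_staticLoop_eval]; simp [h1, h2]
    rw [hLHS, hl, pv_extScan_hit pre ('c'::'s'::'s'::[]) (by decide) ((pre ++ '.' :: ('c'::'s'::'s'::[])).length)
      (by simp only [List.length_append, List.length_cons]; omega) (le_refl _)]
    decide
  by_cases h3 : PySem.Chars.endswith path.toList ('.' :: ('p'::'n'::'g'::[])) = true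
  · obtain ⟨pre, hpre⟩ := (PySem.Chars.endswith_iff _ _).mp h3
    have hl : path.toList = pre ++ '.' :: ('p'::'n'::'g'::[]) := hpre.symm
    have hLHS : staticLoop STATIC_CACHE_RULES.items path = some 31536000 := by
      rw [pv_staticLoop_eval]; simp [h1, h2, h3]
    rw [hLHS, hl, pv_extScan_hit pre ('p'::'n'::'g'::[]) (by decide) ((pre ++ '.' :: ('p'::'n'::'g'::[])).length)
      (by simp only [List.length_append, List.length_cons]; omega) (le_refl _)]
    decide
  by_cases h4 : PySem.Chars.endswith path.toList ('.' :: ('j'::'p'::'g'::[])) = true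
  · obtain ⟨pre, hpre⟩ := (PySem.Chars.endswith_iff _ _).mp h4
    have hl : path.toList = pre ++ '.' :: ('j'::'p'::'g'::[]) := hpre.symm
    have hLHS : staticLoop STATIC_CACHE_RULES.items path = some 31536000 := by
      rw [pv_staticLoop_eval]; simp [h1, h2, h3, h4]
    rw [hLHS, hl, pv_extScan_hit pre ('j'::'p'::'g'::[]) (by decide) ((pre ++ '.' :: ('j'::'p'::'g'::[])).length)
      (by simp only [List.length_append, List.length_cons]; omega) (le_refl _)]
    decide
  by_cases h5 : PySem.Chars.endswith path.toList ('.' :: ('j'::'p'::'e'::'g'::[])) = true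
  · obtain ⟨pre, hpre⟩ := (PySem.Chars.endswith_iff _ _).mp h5
    have hl : path.toList = pre ++ '.' :: ('j'::'p'::'e'::'g'::[]) := hpre.symm
    have hLHS : staticLoop STATIC_CACHE_RULES.items path = some 31536000 := by
      rw [pv_staticLoop_eval]; simp [h1, h2, h3, h4, h5]
    rw [hLHS, hl, pv_extScan_hit pre ('j'::'p'::'e'::'g'::[]) (by decide) ((pre ++ '.' :: ('j'::'p'::'e'::'g'::[])).length)
      (by simp only [List.length_append, List.length_cons]; omega) (le_refl _)]
    decide
  by_cases h6 : PySem.Chars.endswith path.toList ('.' :: ('g'::'i'::'f'::[])) = true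
  · obtain ⟨pre, hpre⟩ := (PySem.Chars.endswith_iff _ _).mp h6
    have hl : path.toList = pre ++ '.' :: ('g'::'i'::'f'::[]) := hpre.symm
    have hLHS : staticLoop STATIC_CACHE_RULES.items path = some 31536000 := by
      rw [pv_staticLoop_eval]; simp [h1, h2, h3, h4, h5, h6]
    rw [hLHS, hl, pv_extScan_hit pre ('g'::'i'::'f'::[]) (by decide) ((pre ++ '.' :: ('g'::'i'::'f'::[])).length)
      (by simp only [List.length_append, List.length_cons]; omega) (le_refl _)]
    decide
  by_cases h7 : PySem.Chars.endswith path.toList ('.' :: ('s'::'v'::'g'::[])) = true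
  · obtain ⟨pre, hpre⟩ := (PySem.Chars.endswith_iff _ _).mp h7
    have hl : path.toList = pre ++ '.' :: ('s'::'v'::'g'::[]) := hpre.symm
    have hLHS : staticLoop STATIC_CACHE_RULES.items path = some 31536000 := by
      rw [pv_staticLoop_eval]; simp [h1, h2, h3, h4, h5, h6, h7]
    rw [hLHS, hl, pv_extScan_hit pre ('s'::'v'::'g'::[]) (by decide) ((pre ++ '.' :: ('s'::'v'::'g'::[])).length)
      (by simp only [List.length_append, List.length_cons]; omega) (le_refl _)]
    decide
  by_cases h8 : PySem.Chars.endswith path.toList ('.' :: ('i'::'c'::'o'::[])) = true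
  · obtain ⟨pre, hpre⟩ := (PySem.Chars.endswith_iff _ _).mp h8
    have hl : path.toList = pre ++ '.' :: ('i'::'c'::'o'::[]) := hpre.symm
    have hLHS : staticLoop STATIC_CACHE_RULES.items path = some 31536000 := by
      rw [pv_staticLoop_eval]; simp [h1, h2, h3, h4, h5, h6, h7, h8]
    rw [hLHS, hl, pv_extScan_hit pre ('i'::'c'::'o'::[]) (by decide) ((pre ++ '.' :: ('i'::'c'::'o'::[])).length)
      (by simp only [List.length_append, List.length_cons]; omega) (le_refl _)]
    decide
  by_cases h9 : PySem.Chars.endswith path.toList ('.' :: ('w'::'o'::'f'::'f'::'2'::[])) = true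
  · obtain ⟨pre, hpre⟩ := (PySem.Chars.endswith_iff _ _).mp h9
    have hl : path.toList = pre ++ '.' :: ('w'::'o'::'f'::'f'::'2'::[]) := hpre.symm
    have hLHS : staticLoop STATIC_CACHE_RULES.items path = some 31536000 := by
      rw [pv_staticLoop_eval]; simp [h1, h2, h3, h4, h5, h6, h7, h8, h9]
    rw [hLHS, hl, pv_extScan_hit pre ('w'::'o'::'f'::'f'::'2'::[]) (by decide) ((pre ++ '.' :: ('w'::'o'::'f'::'f'::'2'::[])).length)
      (by simp only [List.length_append, List.length_cons]; omega) (le_refl _)]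
    decide
  by_cases h10 : PySem.Chars.endswith path.toList ('.' :: ('w'::'o'::'f'::'f'::[])) = true
  · obtain ⟨pre, hpre⟩ := (PySem.Chars.endswith_iff _ _).mp h10
    have hl : path.toList = pre ++ '.' :: ('w'::'o'::'f'::'f'::[]) := hpre.symm
    have hLHS : staticLoop STATIC_CACHE_RULES.items path = some 31536000 := by
      rw [pv_staticLoop_eval]; simp [h1, h2, h3, h4, h5, h6, h7, h8, h9, h10]
    rw [hLHS, hl, pv_extScan_hit pre ('w'::'o'::'f'::'f'::[]) (by decide) ((pre ++ '.' :: ('w'::'o'::'f'::'f'::[])).length)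
      (by simp only [List.length_append, List.length_cons]; omega) (le_refl _)]
    decide
  by_cases h11 : PySem.Chars.endswith path.toList ('.' :: ('t'::'t'::'f'::[])) = true
  · obtain ⟨pre, hpre⟩ := (PySem.Chars.endswith_iff _ _).mp h11
    have hl : path.toList = pre ++ '.' :: ('t'::'t'::'f'::[]) := hpre.symm
    have hLHS : staticLoop STATIC_CACHE_RULES.items path = some 31536000 := by
      rw [pv_staticLoop_eval]; simp [h1, h2, h3, h4, h5, h6, h7, h8, h9, h10, h11]
    rw [hLHS, hl, pv_extScan_hit pre ('t'::'t'::'f'::[]) (by decide) ((pre ++ '.' :: ('t'::'t'::'f'::[])).length)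
      (by simp only [List.length_append, List.length_cons]; omega) (le_refl _)]
    decide
  by_cases h12 : PySem.Chars.endswith path.toList ('.' :: ('w'::'e'::'b'::'p'::[])) = true
  · obtain ⟨pre, hpre⟩ := (PySem.Chars.endswith_iff _ _).mp h12
    have hl : path.toList = pre ++ '.' :: ('w'::'e'::'b'::'p'::[]) := hpre.symm
    have hLHS : staticLoop STATIC_CACHE_RULES.items path = some 31536000 := by
      rw [pv_staticLoop_eval]; simp [h1, h2, h3, h4, h5, h6, h7, h8, h9, h10, h11, h12]
    rw [hLHS, hl, pv_extScan_hit pre ('w'::'e'::'b'::'p'::[]) (by decide) ((pre ++ '.' :: ('w'::'e'::'b'::'p'::[])).length)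
      (by simp only [List.length_append, List.length_cons]; omega) (le_refl _)]
    decide
  have hLHS : staticLoop STATIC_CACHE_RULES.items path = none := by
    rw [pv_staticLoop_eval]; simp [h1, h2, h3, h4, h5, h6, h7, h8, h9, h10, h11, h12]
  rw [hLHS, pv_extScan_miss path.toList ?_ path.toList.length]
  intro e he
  simp only [pvStaticKeys, List.mem_cons, List.not_mem_nil, or_false] at he
  rcases he with rfl|rfl|rfl|rfl|rfl|rfl|rfl|rfl|rfl|rfl|rfl|rfl
  exacts [pv_not_suffix h1, pv_not_suffix h2, pv_not_suffix h3, pv_not_suffix h4,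
    pv_not_suffix h5, pv_not_suffix h6, pv_not_suffix h7, pv_not_suffix h8,
    pv_not_suffix h9, pv_not_suffix h10, pv_not_suffix h11, pv_not_suffix h12]

theorem pv_endswith_false_chars {path e : String}
    (h : PySem.Str.endswith path e = false) :
    ¬ PySem.Chars.endswith path.toList e.toList = true := by
  rw [← PySem.Str.endswith_eq, h]; simp

theorem pv_staticLoop_ne_none {rules : List (String × Int)} {path e : String} {v : Int}
    (he : (e, v) ∈ rules) (h : PySem.Str.endswith path e = true) :
    staticLoop rules path ≠ none := by
  induction rules with
  | nil => simp at he
  | cons p rest ih =>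
    obtain ⟨k, d⟩ := p
    simp only [staticLoop]
    by_cases hc : PySem.Str.endswith path k = true
    · simp [show PySem.Chars.endswith path.toList k.toList = true from hc]
    · rw [if_neg hc]
      rcases List.mem_cons.mp he with heq | hmem
      · have hek : e = k := (Prod.mk.injEq _ _ _ _ ▸ heq).1
        exact absurd (hek ▸ h) hc
      · exact ih hmem

theorem pv_staticLoop_none (path : String)
    (h : staticLoop STATIC_CACHE_RULES.items path = none) :
    ∀ e ∈ pvStaticKeys, PySem.Str.endswith path e = false := by
  intro e he
  by_cases ht : PySem.Str.endswith path e = true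
  swap
  · exact Bool.eq_false_iff.mpr ht
  exfalso
  simp only [pvStaticKeys, List.mem_cons, List.not_mem_nil, or_false] at he
  rcases he with rfl|rfl|rfl|rfl|rfl|rfl|rfl|rfl|rfl|rfl|rfl|rfl
  exacts [pv_staticLoop_ne_none (e := ".js") (v := 2592000) (by decide) ht h,
    pv_staticLoop_ne_none (e := ".css") (v := 2592000) (by decide) ht h,
    pv_staticLoop_ne_none (e := ".png") (v := 31536000) (by decide) ht h,
    pv_staticLoop_ne_none (e := ".jpg") (v := 31536000) (by decide) ht h,
    pv_staticLoop_ne_none (e := ".jpeg") (v := 31536000) (by decide) ht h,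
    pv_staticLoop_ne_none (e := ".gif") (v := 31536000) (by decide) ht h,
    pv_staticLoop_ne_none (e := ".svg") (v := 31536000) (by decide) ht h,
    pv_staticLoop_ne_none (e := ".ico") (v := 31536000) (by decide) ht h,
    pv_staticLoop_ne_none (e := ".woff2") (v := 31536000) (by decide) ht h,
    pv_staticLoop_ne_none (e := ".woff") (v := 31536000) (by decide) ht h,
    pv_staticLoop_ne_none (e := ".ttf") (v := 31536000) (by decide) ht h,
    pv_staticLoop_ne_none (e := ".webp") (v := 31536000) (by decide) ht h]

-- pairwise clashes between prefix-rule keys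
theorem pv_Q_health_live {l : List Char} (qh : pvQ l "/health") (ql : pvQ l "/api/live") : False :=
  pv_take_clash qh.1 ql.1 (by decide) (by decide)
theorem pv_Q_health_robots {l : List Char} (qh : pvQ l "/health") (qr : pvQ l "/robots.txt") : False :=
  pv_take_clash qh.1 qr.1 (by decide) (by decide)
theorem pv_Q_live_robots {l : List Char} (ql : pvQ l "/api/live") (qr : pvQ l "/robots.txt") : False :=
  pv_take_clash ql.1 qr.1 (by decide) (by decide)

theorem pv_api_eq (path : String)
    (hns : ¬ (path = "/api/live/stats" ∨ PySem.Str.startswith path "/api/live/stats/" = true)) :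
    apiLoop API_CACHE_RULES.items path =
      (match PySem.Dict.get? API_CACHE_RULES path with
       | some d => some d
       | none => apiScan path.toList path.toList.length) := by
  push Not at hns
  obtain ⟨hne, hnsw⟩ := hns
  have happ : ("/api/live/stats" ++ "/" : String) = "/api/live/stats/" := rfl
  have hnQs : ¬ pvQ path.toList "/api/live/stats" := fun hq =>
    hnsw (happ ▸ (pv_startswith_slash_iff path "/api/live/stats").mpr hq)
  by_cases e1 : path = "/health"
  · subst e1; decide
  by_cases e2 : path = "/api/live"
  · subst e2; decide
  by_cases e3 : path = "/robots.txt"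
  · subst e3; decide
  have hget : PySem.Dict.get? API_CACHE_RULES path = none := by
    rw [pv_api_get, if_neg (fun h => e1 h.symm), if_neg (fun h => e2 h.symm),
      if_neg (fun h => hne h.symm), if_neg (fun h => e3 h.symm)]
  rw [hget]
  by_cases q1 : pvQ path.toList "/health"
  · rw [pv_apiLoop_eval, if_pos (pv_cond_true_of_Q path "/health" q1)]
    rw [pv_apiScan_hit path.toList "/health" 10 (by decide) q1 ?_ path.toList.length
      ?_ (le_refl _)]
    · intro k' hk' hlen hq'
      simp only [pvApiKeys, List.mem_cons, List.not_mem_nil, or_false] at hk'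
      rcases hk' with rfl|rfl|rfl|rfl
      · simp at hlen
      · exact pv_Q_health_live q1 hq'
      · exact hnQs hq'
      · exact pv_Q_health_robots q1 hq'
    · exact (List.getElem?_eq_some_iff.mp q1.2).1
  by_cases q2 : pvQ path.toList "/api/live"
  · rw [pv_apiLoop_eval, if_neg (by rw [pv_cond_false path "/health" e1 q1]; simp),
      if_pos (pv_cond_true_of_Q path "/api/live" q2)]
    rw [pv_apiScan_hit path.toList "/api/live" 5 (by decide) q2 ?_ path.toList.length
      ?_ (le_refl _)]
    · intro k' hk' hlen hq'
      simp only [pvApiKeys, List.mem_cons, List.not_mem_nil, or_false] at hk'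
      rcases hk' with rfl|rfl|rfl|rfl
      · simp at hlen
      · simp at hlen
      · exact hnQs hq'
      · exact pv_Q_live_robots q2 hq'
    · exact (List.getElem?_eq_some_iff.mp q2.2).1
  by_cases q3 : pvQ path.toList "/robots.txt"
  · rw [pv_apiLoop_eval, if_neg (by rw [pv_cond_false path "/health" e1 q1]; simp),
      if_neg (by rw [pv_cond_false path "/api/live" e2 q2]; simp),
      if_neg (by rw [pv_cond_false path "/api/live/stats" hne hnQs]; simp),
      if_pos (pv_cond_true_of_Q path "/robots.txt" q3)]
    rw [pv_apiScan_hit path.toList "/robots.txt" 86400 (by decide) q3 ?_ path.toList.length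
      ?_ (le_refl _)]
    · intro k' hk' hlen hq'
      simp only [pvApiKeys, List.mem_cons, List.not_mem_nil, or_false] at hk'
      rcases hk' with rfl|rfl|rfl|rfl
      · simp at hlen
      · simp at hlen
      · exact hnQs hq'
      · simp at hlen
    · exact (List.getElem?_eq_some_iff.mp q3.2).1
  · rw [pv_apiLoop_eval, if_neg (by rw [pv_cond_false path "/health" e1 q1]; simp),
      if_neg (by rw [pv_cond_false path "/api/live" e2 q2]; simp),
      if_neg (by rw [pv_cond_false path "/api/live/stats" hne hnQs]; simp),
      if_neg (by rw [pv_cond_false path "/robots.txt" e3 q3]; simp)]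
    rw [pv_apiScan_miss path.toList ?_ path.toList.length]
    intro k hk
    simp only [pvApiKeys, List.mem_cons, List.not_mem_nil, or_false] at hk
    rcases hk with rfl|rfl|rfl|rfl
    exacts [q1, q2, hnQs, q3]

theorem pv_Q_live_of_stats {l : List Char} (q : pvQ l "/api/live/stats") : pvQ l "/api/live" := by
  constructor
  · have ht : l.take 9 = (l.take 15).take 9 := by rw [List.take_take]; rfl
    rw [show ("/api/live" : String).toList.length = 9 from rfl, ht,
      show l.take 15 = ("/api/live/stats" : String).toList from q.1]
    decide
  · have h9 : (l.take 15)[9]? = l[9]? := List.getElem?_take_of_lt (by omega)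
    rw [show ("/api/live" : String).toList.length = 9 from rfl, ← h9,
      show l.take 15 = ("/api/live/stats" : String).toList from q.1]
    decide

-- ===== VERDICT (by name: the statement is the Claim_ definition above) =====
theorem get_cache_duration_spec : Claim_unchanged_get_cache_duration := by
  intro path _ hnD
  unfold get_cache_duration get_cache_duration_alt
  rw [pv_static_eq]
  cases h : extScan path.toList path.toList.length with
  | some d => rfl
  | none =>
    apply pv_api_eq
    intro hcs
    apply hnD
    refine ⟨hcs, ?_⟩
    apply pv_staticLoop_none
    rw [pv_static_eq, h]

theorem get_cache_duration_changed : Claim_changed_get_cache_duration := by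
  unfold Claim_changed_get_cache_duration; decide

theorem get_cache_duration_tight : Claim_exact_get_cache_duration := by
  intro path _ hD
  obtain ⟨hcs, hext⟩ := hD
  have hsnone : staticLoop STATIC_CACHE_RULES.items path = none := by
    rw [pv_staticLoop_eval]
    simp [(show ¬ PySem.Chars.endswith path.toList ('.' :: ('j'::'s'::[])) = true from pv_endswith_false_chars (hext ".js" (by simp))),
      (show ¬ PySem.Chars.endswith path.toList ('.' :: ('c'::'s'::'s'::[])) = true from pv_endswith_false_chars (hext ".css" (by simp))),
      (show ¬ PySem.Chars.endswith path.toList ('.' :: ('p'::'n'::'g'::[])) = true from pv_endswith_false_chars (hext ".png" (by simp))),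
      (show ¬ PySem.Chars.endswith path.toList ('.' :: ('j'::'p'::'g'::[])) = true from pv_endswith_false_chars (hext ".jpg" (by simp))),
      (show ¬ PySem.Chars.endswith path.toList ('.' :: ('j'::'p'::'e'::'g'::[])) = true from pv_endswith_false_chars (hext ".jpeg" (by simp))),
      (show ¬ PySem.Chars.endswith path.toList ('.' :: ('g'::'i'::'f'::[])) = true from pv_endswith_false_chars (hext ".gif" (by simp))),
      (show ¬ PySem.Chars.endswith path.toList ('.' :: ('s'::'v'::'g'::[])) = true from pv_endswith_false_chars (hext ".svg" (by simp))),
      (show ¬ PySem.Chars.endswith path.toList ('.' :: ('i'::'c'::'o'::[])) = true from pv_endswith_false_chars (hext ".ico" (by simp))),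
      (show ¬ PySem.Chars.endswith path.toList ('.' :: ('w'::'o'::'f'::'f'::'2'::[])) = true from pv_endswith_false_chars (hext ".woff2" (by simp))),
      (show ¬ PySem.Chars.endswith path.toList ('.' :: ('w'::'o'::'f'::'f'::[])) = true from pv_endswith_false_chars (hext ".woff" (by simp))),
      (show ¬ PySem.Chars.endswith path.toList ('.' :: ('t'::'t'::'f'::[])) = true from pv_endswith_false_chars (hext ".ttf" (by simp))),
      (show ¬ PySem.Chars.endswith path.toList ('.' :: ('w'::'e'::'b'::'p'::[])) = true from pv_endswith_false_chars (hext ".webp" (by simp)))]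
  have henone : extScan path.toList path.toList.length = none := by
    rw [← pv_static_eq]; exact hsnone
  have happ : ("/api/live/stats" ++ "/" : String) = "/api/live/stats/" := rfl
  rcases hcs with rfl | hsw
  · decide
  · have hQs : pvQ path.toList "/api/live/stats" :=
      (pv_startswith_slash_iff path "/api/live/stats").mp (by rw [happ]; exact hsw)
    have hlen : 15 < path.toList.length :=
      (show ("/api/live/stats" : String).toList.length = 15 from rfl) ▸
        (List.getElem?_eq_some_iff.mp hQs.2).1
    have hnh : path ≠ "/health" := fun h => absurd (h ▸ hlen) (by decide)
    have hnl : path ≠ "/api/live" := fun h => absurd (h ▸ hlen) (by decide)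
    have hnst : path ≠ "/api/live/stats" := fun h => absurd (h ▸ hlen) (by decide)
    have hnr : path ≠ "/robots.txt" := fun h => absurd (h ▸ hlen) (by decide)
    have hnQh : ¬ pvQ path.toList "/health" := fun qh =>
      pv_Q_health_live qh (pv_Q_live_of_stats hQs)
    have hA : get_cache_duration path = some 5 := by
      unfold get_cache_duration
      rw [hsnone, pv_apiLoop_eval, if_neg (by rw [pv_cond_false path "/health" hnh hnQh]; simp),
        if_pos (pv_cond_true_of_Q path "/api/live" (pv_Q_live_of_stats hQs))]
    have hB : get_cache_duration_alt path = some 30 := by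
      unfold get_cache_duration_alt
      rw [henone]
      have hget : PySem.Dict.get? API_CACHE_RULES path = none := by
        rw [pv_api_get, if_neg (fun h => hnh h.symm), if_neg (fun h => hnl h.symm),
          if_neg (fun h => hnst h.symm), if_neg (fun h => hnr h.symm)]
      rw [hget]
      rw [pv_apiScan_hit path.toList "/api/live/stats" 30 (by decide) hQs ?_ path.toList.length
        hlen (le_refl _)]
      intro k' hk' hl' hq'
      simp only [pvApiKeys, List.mem_cons, List.not_mem_nil, or_false] at hk'
      rcases hk' with rfl|rfl|rfl|rfl <;> simp at hl'
    rw [hA, hB]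
    simp
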